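-- pv_equiv track=rewrite | github.com/MonicaRondon/CIT590 | Assignment 05 Squarelotron/Assignment5Rondon/squarelotron.py | left_right_flip
-- ===== SOURCE A (Python) =====
-- def make_squarelotron(list):
--     """Given a "flat" list of 25 numbers, make and return a squarelotron"""
--     assert len(list) == 25
--     # take list of 25 numbers
--     # tell computer to take the first 5 numbers and put into 1 list
--     # tell computer to take the next 5 numbers and put into 1 list
--     # do this three more times
--     # return new list of lists
--     squarelotron = []
--     for i in range(0, 25, 5):
--         squarelotron.append(list[i: i + 5])
--     return squarelotron
--
-- def make_list(squarelotron):
--     """Given a squarelotron, makes and returns a flat list of 25 numbers"""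
--     list = []
--     #take squarelotron list, add the first row to the empty list
--     #add the second row to the empty list
--     #do this three more times
--     #return full flat list
--     for row in squarelotron:
--         list = list + row
--     return list
--
-- def swap(list, index, distance):
--     """swaps two spots on a FLAT list based on a starter index and distance
--     between the starter and end index"""
--     hold = list[index]
--     list[index] = list[index + distance] #flips location value
--     list[index + distance] = hold
--
-- def left_right_flip(squarelotron, ring):
--     """Performs the Left-Right Flip of the squarelotron
--     and returns the new squarelotron. """
--     new_squarelotron = make_list(squarelotron)
--     if ring == "inner":
--         for i in range (6, 17, 5):
--             swap(new_squarelotron, i, 2)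
--         return make_squarelotron(new_squarelotron)
--     if ring == "outer":
--         new_squarelotron[0:5] = reversed(new_squarelotron[0:5])
--         new_squarelotron[20:25] = reversed(new_squarelotron[20:25])
--         for i in range (5, 16, 5):
--             swap(new_squarelotron, i, 4)
--     return make_squarelotron(new_squarelotron)
-- ===== SOURCE B (Python) =====
-- def left_right_flip(squarelotron, ring):
--     """Performs the Left-Right Flip of the squarelotron
--     and returns the new squarelotron. """
--     flat = [x for row in squarelotron for x in row]
--     if ring == "inner":
--         col = lambda r, c: 4 - c if r in (1, 2, 3) and c in (1, 3) else c
--     elif ring == "outer":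
--         col = lambda r, c: 4 - c if r in (0, 4) or c in (0, 4) else c
--     else:
--         col = lambda r, c: c
--     return [[flat[5 * r + col(r, c)] for c in range(5)] for r in range(5)]
-- ===== Notes on version B (the rewrite author's own statement) =====
-- stated objective: simpler
-- what changed: Instead of flattening, mutating the flat list with reversed-slice assignments and pairwise swap() calls, and re-chunking, B reads each output cell directly from the flat input through a per-ring column-permutation map (r,c) -> old column, building the 5x5 result in one comprehension with no mutation.
import Mathlib
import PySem

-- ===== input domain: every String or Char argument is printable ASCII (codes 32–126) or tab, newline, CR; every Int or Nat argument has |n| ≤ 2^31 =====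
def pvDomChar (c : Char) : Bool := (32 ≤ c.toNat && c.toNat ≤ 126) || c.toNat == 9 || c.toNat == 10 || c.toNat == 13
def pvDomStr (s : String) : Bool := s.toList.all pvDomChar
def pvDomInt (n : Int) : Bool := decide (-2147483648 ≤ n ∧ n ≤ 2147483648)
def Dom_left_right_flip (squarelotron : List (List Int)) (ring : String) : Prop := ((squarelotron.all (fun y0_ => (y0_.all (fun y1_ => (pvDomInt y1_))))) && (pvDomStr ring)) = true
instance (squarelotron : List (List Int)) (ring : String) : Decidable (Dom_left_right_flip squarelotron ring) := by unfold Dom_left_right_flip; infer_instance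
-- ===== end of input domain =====

-- B replaces A's flatten/mutate-with-swaps/re-chunk pipeline by one comprehension that reads each
-- output cell through a per-ring column-permutation map (simpler, no mutation; return value only —
-- A never mutates its argument either, swap() acts on the fresh flat copy).


-- ===== PORT A =====
-- make_list: 'list = []; for row in squarelotron: list = list + row'
def pvMakeList (squarelotron : List (List Int)) : List Int :=
  squarelotron.foldl (fun l row => l ++ row) []

-- make_squarelotron: 'for i in range(0, 25, 5): squarelotron.append(list[i:i+5])'.
-- Its 'assert len(list) == 25' raises exactly when the flat list has length ≠ 25; those
-- inputs are excluded by Pre_ below, so the assert itself is not modelled.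
def pvMakeSquarelotron (l : List Int) : List (List Int) :=
  (PySem.List.pyRange 0 25 5).foldl
    (fun sq i => sq ++ [PySem.List.slice l (some i) (some (i + 5))]) []

-- swap: in-place swap of l[index] and l[index+distance]; pyGetD/pySetD are exact under
-- Pre_ (both indices are in range on a 25-cell flat list).
def pvSwap (l : List Int) (index distance : Int) : List Int :=
  let hold := PySem.List.pyGetD l index 0
  let l := PySem.List.pySetD l index (PySem.List.pyGetD l (index + distance) 0)
  PySem.List.pySetD l (index + distance) hold

def left_right_flip (squarelotron : List (List Int)) (ring : String) : List (List Int) :=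
  let new := pvMakeList squarelotron
  if ring = "inner" then
    pvMakeSquarelotron ((PySem.List.pyRange 6 17 5).foldl (fun l i => pvSwap l i 2) new)
  else
    let new :=
      if ring = "outer" then
        -- new[0:5] = reversed(new[0:5]); new[20:25] = reversed(new[20:25])  (slice assignment)
        let new := (PySem.List.slice new (some 0) (some 5)).reverse ++
                   PySem.List.slice new (some 5) none
        let new := PySem.List.slice new none (some 20) ++
                   (PySem.List.slice new (some 20) (some 25)).reverse ++
                   PySem.List.slice new (some 25) none
        (PySem.List.pyRange 5 16 5).foldl (fun l i => pvSwap l i 4) new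
      else new
    pvMakeSquarelotron new

-- ===== PORT B =====
-- the per-ring column map 'col' from Source B
def pvCol (ring : String) (r c : Int) : Int :=
  if ring = "inner" then
    if (r = 1 ∨ r = 2 ∨ r = 3) ∧ (c = 1 ∨ c = 3) then 4 - c else c
  else if ring = "outer" then
    if (r = 0 ∨ r = 4) ∨ (c = 0 ∨ c = 4) then 4 - c else c
  else c

-- 'flat[...]' is ported as pyGetD (exact under Pre_: every read index lies in 0..24)
def left_right_flip_alt (squarelotron : List (List Int)) (ring : String) : List (List Int) :=
  let flat := squarelotron.flatMap (fun row => row)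
  (PySem.List.pyRange 0 5 1).map (fun r =>
    (PySem.List.pyRange 0 5 1).map (fun c =>
      PySem.List.pyGetD flat (5 * r + pvCol ring r c) 0))

-- ===== PRECONDITION & SPEC =====
-- A's make_squarelotron asserts that the flattened grid has exactly 25 cells and raises
-- AssertionError otherwise; Pre_ admits exactly the inputs on which A returns.
def Pre_left_right_flip (squarelotron : List (List Int)) (ring : String) : Prop :=
  squarelotron.flatten.length = 25

instance (squarelotron : List (List Int)) (ring : String) : Decidable (Pre_left_right_flip squarelotron ring) := by unfold Pre_left_right_flip; infer_instance

def pvWitness_left_right_flip : List (List Int) × String :=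
  ([[1,2,3,4,5],[6,7,8,9,10],[11,12,13,14,15],[16,17,18,19,20],[21,22,23,24,25]], "outer")

def Spec_left_right_flip (squarelotron : List (List Int)) (ring : String) (out : List (List Int)) : Prop := out = left_right_flip_alt squarelotron ring
instance (squarelotron : List (List Int)) (ring : String) (out : List (List Int)) : Decidable (Spec_left_right_flip squarelotron ring out) := by unfold Spec_left_right_flip; infer_instance

-- ===== CLAIM (what is proved, stated in full; the proofs are below) =====
def Claim_equal_left_right_flip : Prop := ∀ (squarelotron : List (List Int)) (ring : String), Dom_left_right_flip squarelotron ring → Pre_left_right_flip squarelotron ring → Spec_left_right_flip squarelotron ring (left_right_flip squarelotron ring)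

-- ===== LEMMAS AND PROOFS =====

theorem pvMakeList_eq_flatten (squarelotron : List (List Int)) :
    pvMakeList squarelotron = squarelotron.flatten := by
  suffices h : ∀ acc : List Int,
      squarelotron.foldl (fun l row => l ++ row) acc = acc ++ squarelotron.flatten by
    simpa [pvMakeList] using h []
  induction squarelotron with
  | nil => simp
  | cons r t ih => intro acc; simp [List.foldl_cons, ih]

-- with the 25 cells exposed, each ring branch of each port evaluates by kernel reduction
-- to an explicit grid, and the two grids coincide.
set_option maxHeartbeats 2000000 in
theorem pvCoreInner (a0 a1 a2 a3 a4 a5 a6 a7 a8 a9 a10 a11 a12 a13 a14 a15 a16 a17 a18 a19 a20 a21 a22 a23 a24 : Int)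
    (squarelotron : List (List Int))
    (hf : squarelotron.flatten = [a0,a1,a2,a3,a4,a5,a6,a7,a8,a9,a10,a11,a12,a13,a14,a15,a16,a17,a18,a19,a20,a21,a22,a23,a24]) :
    left_right_flip squarelotron "inner" = left_right_flip_alt squarelotron "inner" := by
  have hfm : squarelotron.flatMap (fun row => row) = [a0,a1,a2,a3,a4,a5,a6,a7,a8,a9,a10,a11,a12,a13,a14,a15,a16,a17,a18,a19,a20,a21,a22,a23,a24] := by
    simpa [List.flatMap_def] using hf
  have hA : left_right_flip squarelotron "inner" = [[a0,a1,a2,a3,a4],[a5,a8,a7,a6,a9],[a10,a13,a12,a11,a14],[a15,a18,a17,a16,a19],[a20,a21,a22,a23,a24]] := by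
    simp only [left_right_flip, pvMakeList_eq_flatten, hf, reduceIte]
    rw [show PySem.List.pyRange 6 17 5 = [6, 11, 16] from rfl]
    simp only [List.foldl_cons, List.foldl_nil]
    rw [show pvSwap [a0,a1,a2,a3,a4,a5,a6,a7,a8,a9,a10,a11,a12,a13,a14,a15,a16,a17,a18,a19,a20,a21,a22,a23,a24] 6 2 = [a0,a1,a2,a3,a4,a5,a8,a7,a6,a9,a10,a11,a12,a13,a14,a15,a16,a17,a18,a19,a20,a21,a22,a23,a24] from rfl]
    rw [show pvSwap [a0,a1,a2,a3,a4,a5,a8,a7,a6,a9,a10,a11,a12,a13,a14,a15,a16,a17,a18,a19,a20,a21,a22,a23,a24] 11 2 = [a0,a1,a2,a3,a4,a5,a8,a7,a6,a9,a10,a13,a12,a11,a14,a15,a16,a17,a18,a19,a20,a21,a22,a23,a24] from rfl]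
    rw [show pvSwap [a0,a1,a2,a3,a4,a5,a8,a7,a6,a9,a10,a13,a12,a11,a14,a15,a16,a17,a18,a19,a20,a21,a22,a23,a24] 16 2 = [a0,a1,a2,a3,a4,a5,a8,a7,a6,a9,a10,a13,a12,a11,a14,a15,a18,a17,a16,a19,a20,a21,a22,a23,a24] from rfl]
    rfl
  have hB : left_right_flip_alt squarelotron "inner" = [[a0,a1,a2,a3,a4],[a5,a8,a7,a6,a9],[a10,a13,a12,a11,a14],[a15,a18,a17,a16,a19],[a20,a21,a22,a23,a24]] := by
    simp only [left_right_flip_alt, hfm]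
    rfl
  rw [hA, hB]

set_option maxHeartbeats 2000000 in
theorem pvCoreOuter (a0 a1 a2 a3 a4 a5 a6 a7 a8 a9 a10 a11 a12 a13 a14 a15 a16 a17 a18 a19 a20 a21 a22 a23 a24 : Int)
    (squarelotron : List (List Int))
    (hf : squarelotron.flatten = [a0,a1,a2,a3,a4,a5,a6,a7,a8,a9,a10,a11,a12,a13,a14,a15,a16,a17,a18,a19,a20,a21,a22,a23,a24]) :
    left_right_flip squarelotron "outer" = left_right_flip_alt squarelotron "outer" := by
  have hfm : squarelotron.flatMap (fun row => row) = [a0,a1,a2,a3,a4,a5,a6,a7,a8,a9,a10,a11,a12,a13,a14,a15,a16,a17,a18,a19,a20,a21,a22,a23,a24] := by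
    simpa [List.flatMap_def] using hf
  have hA : left_right_flip squarelotron "outer" = [[a4,a3,a2,a1,a0],[a9,a6,a7,a8,a5],[a14,a11,a12,a13,a10],[a19,a16,a17,a18,a15],[a24,a23,a22,a21,a20]] := by
    simp only [left_right_flip, pvMakeList_eq_flatten, hf, reduceIte]
    rw [show ((PySem.List.slice [a0,a1,a2,a3,a4,a5,a6,a7,a8,a9,a10,a11,a12,a13,a14,a15,a16,a17,a18,a19,a20,a21,a22,a23,a24] (some 0) (some 5)).reverse ++ PySem.List.slice [a0,a1,a2,a3,a4,a5,a6,a7,a8,a9,a10,a11,a12,a13,a14,a15,a16,a17,a18,a19,a20,a21,a22,a23,a24] (some 5) none : List Int) = [a4,a3,a2,a1,a0,a5,a6,a7,a8,a9,a10,a11,a12,a13,a14,a15,a16,a17,a18,a19,a20,a21,a22,a23,a24] from rfl]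
    rw [show (PySem.List.slice [a4,a3,a2,a1,a0,a5,a6,a7,a8,a9,a10,a11,a12,a13,a14,a15,a16,a17,a18,a19,a20,a21,a22,a23,a24] none (some 20) ++ (PySem.List.slice [a4,a3,a2,a1,a0,a5,a6,a7,a8,a9,a10,a11,a12,a13,a14,a15,a16,a17,a18,a19,a20,a21,a22,a23,a24] (some 20) (some 25)).reverse ++ PySem.List.slice [a4,a3,a2,a1,a0,a5,a6,a7,a8,a9,a10,a11,a12,a13,a14,a15,a16,a17,a18,a19,a20,a21,a22,a23,a24] (some 25) none : List Int) = [a4,a3,a2,a1,a0,a5,a6,a7,a8,a9,a10,a11,a12,a13,a14,a15,a16,a17,a18,a19,a24,a23,a22,a21,a20] from rfl]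
    rw [show PySem.List.pyRange 5 16 5 = [5, 10, 15] from rfl]
    simp only [List.foldl_cons, List.foldl_nil]
    rw [show pvSwap [a4,a3,a2,a1,a0,a5,a6,a7,a8,a9,a10,a11,a12,a13,a14,a15,a16,a17,a18,a19,a24,a23,a22,a21,a20] 5 4 = [a4,a3,a2,a1,a0,a9,a6,a7,a8,a5,a10,a11,a12,a13,a14,a15,a16,a17,a18,a19,a24,a23,a22,a21,a20] from rfl]
    rw [show pvSwap [a4,a3,a2,a1,a0,a9,a6,a7,a8,a5,a10,a11,a12,a13,a14,a15,a16,a17,a18,a19,a24,a23,a22,a21,a20] 10 4 = [a4,a3,a2,a1,a0,a9,a6,a7,a8,a5,a14,a11,a12,a13,a10,a15,a16,a17,a18,a19,a24,a23,a22,a21,a20] from rfl]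
    rw [show pvSwap [a4,a3,a2,a1,a0,a9,a6,a7,a8,a5,a14,a11,a12,a13,a10,a15,a16,a17,a18,a19,a24,a23,a22,a21,a20] 15 4 = [a4,a3,a2,a1,a0,a9,a6,a7,a8,a5,a14,a11,a12,a13,a10,a19,a16,a17,a18,a15,a24,a23,a22,a21,a20] from rfl]
    rfl
  have hB : left_right_flip_alt squarelotron "outer" = [[a4,a3,a2,a1,a0],[a9,a6,a7,a8,a5],[a14,a11,a12,a13,a10],[a19,a16,a17,a18,a15],[a24,a23,a22,a21,a20]] := by
    simp only [left_right_flip_alt, hfm]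
    rfl
  rw [hA, hB]

set_option maxHeartbeats 2000000 in
theorem pvCoreOther (ring : String) (a0 a1 a2 a3 a4 a5 a6 a7 a8 a9 a10 a11 a12 a13 a14 a15 a16 a17 a18 a19 a20 a21 a22 a23 a24 : Int)
    (squarelotron : List (List Int))
    (hf : squarelotron.flatten = [a0,a1,a2,a3,a4,a5,a6,a7,a8,a9,a10,a11,a12,a13,a14,a15,a16,a17,a18,a19,a20,a21,a22,a23,a24])
    (hi : ring ≠ "inner") (ho : ring ≠ "outer") :
    left_right_flip squarelotron ring = left_right_flip_alt squarelotron ring := by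
  have hfm : squarelotron.flatMap (fun row => row) = [a0,a1,a2,a3,a4,a5,a6,a7,a8,a9,a10,a11,a12,a13,a14,a15,a16,a17,a18,a19,a20,a21,a22,a23,a24] := by
    simpa [List.flatMap_def] using hf
  have hA : left_right_flip squarelotron ring = [[a0,a1,a2,a3,a4],[a5,a6,a7,a8,a9],[a10,a11,a12,a13,a14],[a15,a16,a17,a18,a19],[a20,a21,a22,a23,a24]] := by
    simp only [left_right_flip, pvMakeList_eq_flatten, hf, if_neg hi, if_neg ho]
    rfl
  have hB : left_right_flip_alt squarelotron ring = [[a0,a1,a2,a3,a4],[a5,a6,a7,a8,a9],[a10,a11,a12,a13,a14],[a15,a16,a17,a18,a19],[a20,a21,a22,a23,a24]] := by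
    simp only [left_right_flip_alt, hfm, pvCol, if_neg hi, if_neg ho]
    rfl
  rw [hA, hB]

theorem pvCore (ring : String) (a0 a1 a2 a3 a4 a5 a6 a7 a8 a9 a10 a11 a12 a13 a14 a15 a16 a17 a18 a19 a20 a21 a22 a23 a24 : Int)
    (squarelotron : List (List Int))
    (hf : squarelotron.flatten = [a0,a1,a2,a3,a4,a5,a6,a7,a8,a9,a10,a11,a12,a13,a14,a15,a16,a17,a18,a19,a20,a21,a22,a23,a24]) :
    left_right_flip squarelotron ring = left_right_flip_alt squarelotron ring := by
  by_cases hi : ring = "inner"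
  · exact hi ▸ pvCoreInner a0 a1 a2 a3 a4 a5 a6 a7 a8 a9 a10 a11 a12 a13 a14 a15 a16 a17 a18 a19 a20 a21 a22 a23 a24 squarelotron hf
  · by_cases ho : ring = "outer"
    · exact ho ▸ pvCoreOuter a0 a1 a2 a3 a4 a5 a6 a7 a8 a9 a10 a11 a12 a13 a14 a15 a16 a17 a18 a19 a20 a21 a22 a23 a24 squarelotron hf
    · exact pvCoreOther ring a0 a1 a2 a3 a4 a5 a6 a7 a8 a9 a10 a11 a12 a13 a14 a15 a16 a17 a18 a19 a20 a21 a22 a23 a24 squarelotron hf hi ho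

-- ===== VERDICT (by name: the statement is the Claim_ definition above) =====
theorem left_right_flip_spec : Claim_equal_left_right_flip := by
  intro squarelotron ring _ hpre
  unfold Spec_left_right_flip
  have h25 : squarelotron.flatten.length = 25 := hpre
  obtain ⟨b0, b1, b2, b3, b4, b5, b6, b7, b8, b9, b10, b11, b12, b13, b14, b15, b16, b17, b18, b19, b20, b21, b22, b23, b24, hf⟩ :
      ∃ b0 b1 b2 b3 b4 b5 b6 b7 b8 b9 b10 b11 b12 b13 b14 b15 b16 b17 b18 b19 b20 b21 b22 b23 b24 : Int,
        squarelotron.flatten = [b0,b1,b2,b3,b4,b5,b6,b7,b8,b9,b10,b11,b12,b13,b14,b15,b16,b17,b18,b19,b20,b21,b22,b23,b24] := by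
    match hl : squarelotron.flatten, h25 with
    | [b0,b1,b2,b3,b4,b5,b6,b7,b8,b9,b10,b11,b12,b13,b14,b15,b16,b17,b18,b19,b20,b21,b22,b23,b24], _ =>
      exact ⟨b0, b1, b2, b3, b4, b5, b6, b7, b8, b9, b10, b11, b12, b13, b14, b15, b16, b17, b18, b19, b20, b21, b22, b23, b24, rfl⟩
  exact pvCore ring b0 b1 b2 b3 b4 b5 b6 b7 b8 b9 b10 b11 b12 b13 b14 b15 b16 b17 b18 b19 b20 b21 b22 b23 b24 squarelotron hf
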